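-- pv_equiv track=rewrite | github.com/LRenDO/python-unit-test-project | task.py | conv_endian
-- ===== SOURCE A (Python) =====
-- def reverse_endianness(hex_str):
--     """This function reverses a little endian hexadecimal byte string to big
--     endian or vice versa
--
--     :param hex_str: a string of hexadecimal bytes separated by spaces
--     :return: a string of hexadecimal bytes separated by spaces of the opposite
--         endianness
--     """
--     i = 0
--     j = 1
--     m = len(hex_str) - 2
--     n = len(hex_str) - 1
--     new_str = list(hex_str)
--
--     while(i <= m):
--         new_str[i] = hex_str[m]
--         new_str[j] = hex_str[n]
--         new_str[m] = hex_str[i]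
--         new_str[n] = hex_str[j]
--         i += 3
--         j += 3
--         m -= 3
--         n -= 3
--
--     new_str = ''.join(new_str)
--
--     return new_str
--
-- def conv_endian(num, endian='big'):
--     """This function converts a decimal integer to a string of hexadecimal
--     bytes
--
--     :param num: a decimal integer to be converted to hexadecimal bytes
--     :param endian: can be 'big' or 'little', 'big' is the default if not
--                    supplied
--     :return: a string of hexadecimal bytes in big or little endian form
--              separated by spaces, may include a negative sign
--
--     adapted from:
--     https://pencilprogrammer.com/python-programs/convert-decimal-to-hexadecimal
--     """
--     if endian != 'big' and endian != 'little':
--         return None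
--
--     if num == 0:
--         return '00'
--
--     hex_digits = ['0', '1', '2', '3', '4', '5', '6', '7', '8', '9', 'A', 'B',
--                   'C', 'D', 'E', 'F']
--     decimal = abs(num)
--     hex_str = ''
--
--     # each byte is made up of 2 hex digits, digit_num keeps track of which
--     # digit we are currently on
--     digit_num = 0
--
--     while(decimal > 0):
--         remainder = decimal % 16
--         hex_str = hex_digits[remainder] + hex_str
--         digit_num += 1
--         decimal = decimal // 16
--         if digit_num == 2 and decimal != 0:     # add a space only if we have
--             hex_str = ' ' + hex_str             # finished a byte and have more
--             digit_num = 0                       # bytes to write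
--
--     if digit_num == 1:                          # fill out the final byte with
--         hex_str = '0' + hex_str                 # an initial zero if necessary
--
--     if endian == 'little':
--         hex_str = reverse_endianness(hex_str)
--
--     if num < 0:
--         hex_str = '-' + hex_str
--
--     return hex_str
-- ===== SOURCE B (Python) =====
-- def conv_endian(num, endian='big'):
--     """Convert a decimal integer to spaced hex bytes (big or little endian).
--
--     Two-phase: convert the whole magnitude with format(), then pad/group
--     into bytes, instead of A's interleaved digit-by-digit loop."""
--     if endian != 'big' and endian != 'little':
--         return None
--     h = format(abs(num), 'X')
--     if len(h) % 2:
--         h = '0' + h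
--     parts = [h[i:i+2] for i in range(0, len(h), 2)]
--     if endian == 'little':
--         parts.reverse()
--     out = ' '.join(parts)
--     if num < 0:
--         out = '-' + out
--     return out
-- ===== Notes on version B (the rewrite author's own statement) =====
-- stated objective: idiomatic
-- what changed: Replaces A's interleaved digit-by-digit loop (building the string with in-loop spacing, a trailing pad fix-up, and a two-pointer in-place byte-swap for little endian) by a two-phase convert-then-group structure: format() produces the whole hex body, it is padded to even length, split into byte chunks, the chunk list reversed for little endian, and joined with spaces.
import Mathlib
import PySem

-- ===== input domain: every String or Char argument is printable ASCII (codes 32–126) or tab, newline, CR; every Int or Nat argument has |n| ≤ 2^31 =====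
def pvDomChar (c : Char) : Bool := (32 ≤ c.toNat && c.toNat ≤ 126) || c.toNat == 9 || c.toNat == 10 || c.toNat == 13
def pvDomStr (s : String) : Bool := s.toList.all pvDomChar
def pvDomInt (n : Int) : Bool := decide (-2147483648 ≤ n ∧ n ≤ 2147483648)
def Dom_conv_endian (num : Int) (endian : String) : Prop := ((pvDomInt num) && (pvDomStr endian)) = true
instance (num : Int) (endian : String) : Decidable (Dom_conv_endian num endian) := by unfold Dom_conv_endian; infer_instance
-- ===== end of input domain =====

-- B replaces A's interleaved digit-by-digit loop (in-loop spacing, trailing pad fix-up, two-pointer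
-- in-place byte swap for little endian) by a convert-then-group structure: whole hex body first,
-- then pad to even length, split into byte chunks, reverse the chunk list for little endian, join.
-- Objective: idiomatic. Equal return value on every input (both are total).

-- ===== PORT A =====

-- the while-loop of reverse_endianness; new_str[x] = hex_str[y] assignments are ported with
-- pySetD/pyGetD (exact while the indices are in range, which they are whenever the loop body runs
-- on the strings conv_endian passes in)
def revLoop (orig : List Char) (new : List Char) (i j m n : Int) : List Char :=
  if hc : i ≤ m then
    let s1 := PySem.List.pySetD new i (PySem.List.pyGetD orig m ' ')
    let s2 := PySem.List.pySetD s1 j (PySem.List.pyGetD orig n ' ')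
    let s3 := PySem.List.pySetD s2 m (PySem.List.pyGetD orig i ' ')
    let s4 := PySem.List.pySetD s3 n (PySem.List.pyGetD orig j ' ')
    revLoop orig s4 (i + 3) (j + 3) (m - 3) (n - 3)
  else new
termination_by (m - i + 6).toNat
decreasing_by omega

def reverse_endianness (hex_str : List Char) : List Char :=
  revLoop hex_str hex_str 0 1 ((hex_str.length : Int) - 2) ((hex_str.length : Int) - 1)

def hexDigitsA : List (List Char) :=
  [['0'], ['1'], ['2'], ['3'], ['4'], ['5'], ['6'], ['7'], ['8'], ['9'],
   ['A'], ['B'], ['C'], ['D'], ['E'], ['F']]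

-- the while-loop of conv_endian (state: decimal, hex_str, digit_num)
def convLoop (decimal : Int) (hex_str : List Char) (digit_num : Int) : List Char × Int :=
  if _h : decimal > 0 then
    let remainder := PySem.Int.mod decimal 16
    let hex_str1 := PySem.List.pyGetD hexDigitsA remainder [] ++ hex_str
    let digit_num1 := digit_num + 1
    let decimal1 := PySem.Int.floordiv decimal 16
    if digit_num1 = 2 ∧ decimal1 ≠ 0 then
      convLoop decimal1 (' ' :: hex_str1) 0
    else
      convLoop decimal1 hex_str1 digit_num1
  else (hex_str, digit_num)
termination_by decimal.toNat
decreasing_by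
  all_goals
    have h16 : PySem.Int.floordiv decimal 16 = decimal / 16 :=
      PySem.Int.floordiv_eq_ediv_of_pos (by omega)
    simp only [h16]; omega

def conv_endian (num : Int) (endian : String) : Option String :=
  if endian ≠ "big" ∧ endian ≠ "little" then none
  else if num = 0 then some "00"
  else
    let decimal : Int := |num|
    let r := convLoop decimal [] 0
    let hex_str := r.1
    let hex_str := if r.2 = 1 then '0' :: hex_str else hex_str
    let hex_str := if endian = "little" then reverse_endianness hex_str else hex_str
    let hex_str := if num < 0 then '-' :: hex_str else hex_str
    some (String.ofList hex_str)

-- ===== PORT B =====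

-- one hex digit, uppercase (the digits format(·,'X') uses)
def hexChar (n : Nat) : Char :=
  if n < 10 then Char.ofNat (48 + n) else Char.ofNat (55 + n)

-- format(d, 'X') for d ≥ 0: big-endian uppercase hex digits, no padding
def toHexChars (d : Nat) : List Char :=
  if _h : d < 16 then [hexChar d]
  else toHexChars (d / 16) ++ [hexChar (d % 16)]
decreasing_by exact Nat.div_lt_self (by omega) (by omega)

-- [h[i:i+2] for i in range(0, len(h), 2)]
def chunk2 : List Char → List (List Char)
  | [] => []
  | [a] => [[a]]
  | a :: b :: t => [a, b] :: chunk2 t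

def conv_endian_alt (num : Int) (endian : String) : Option String :=
  if endian ≠ "big" ∧ endian ≠ "little" then none
  else
    let h := toHexChars num.natAbs
    let h := if h.length % 2 = 1 then '0' :: h else h
    let parts := chunk2 h
    let parts := if endian = "little" then parts.reverse else parts
    let out := PySem.Chars.join [' '] parts
    some (String.ofList (if num < 0 then '-' :: out else out))

-- ===== PRECONDITION & SPEC =====
def Spec_conv_endian (num : Int) (endian : String) (out : Option String) : Prop := out = conv_endian_alt num endian
instance (num : Int) (endian : String) (out : Option String) : Decidable (Spec_conv_endian num endian out) := by unfold Spec_conv_endian; infer_instance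

-- ===== CLAIM (what is proved, stated in full; the proofs are below) =====
def Claim_equal_conv_endian : Prop := ∀ (num : Int) (endian : String), Dom_conv_endian num endian → Spec_conv_endian num endian (conv_endian num endian)

-- ===== LEMMAS AND PROOFS =====

-- big-endian byte list of d: each entry is a 2-digit block
def bytesBE (d : Nat) : List (List Char) :=
  if h : d < 256 then [[hexChar (d / 16), hexChar (d % 16)]]
  else bytesBE (d / 256) ++ [[hexChar (d % 256 / 16), hexChar (d % 16)]]
decreasing_by exact Nat.div_lt_self (by omega) (by omega)

theorem bytesBE_ne_nil (d : Nat) : bytesBE d ≠ [] := by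
  rw [bytesBE]; split <;> simp

theorem bytesBE_blocks (d : Nat) : ∀ b ∈ bytesBE d, b.length = 2 := by
  induction d using bytesBE.induct with
  | case1 d h => rw [bytesBE]; simp [h]
  | case2 d h ih => rw [bytesBE]; simp only [dif_neg h]; intro b hb
                    rcases List.mem_append.1 hb with h1 | h1
                    · exact ih b h1
                    · simp at h1; simp [h1]

-- A-side characterisation of convLoop --------------------------------------

def spacedA (d : Nat) : List Char :=
  if _h : d < 16 then [hexChar d]
  else if _h2 : d < 256 then [hexChar (d / 16), hexChar (d % 16)]
  else spacedA (d / 256) ++ ' ' :: [hexChar (d % 256 / 16), hexChar (d % 16)]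
decreasing_by exact Nat.div_lt_self (by omega) (by omega)

def dnA (d : Nat) : Int :=
  if _h : d < 16 then 1
  else if _h2 : d < 256 then 2
  else dnA (d / 256)
decreasing_by exact Nat.div_lt_self (by omega) (by omega)

theorem hexDigitsA_lookup (r : Nat) (h : r < 16) :
    PySem.List.pyGetD hexDigitsA ((r : Nat) : Int) [] = [hexChar r] := by
  rw [PySem.List.pyGetD_natCast]
  interval_cases r <;> rfl

theorem convLoop_zero (s : List Char) (dn : Int) : convLoop 0 s dn = (s, dn) := by
  rw [convLoop]; norm_num

theorem convLoop_spec (d : Nat) (hd : 1 ≤ d) (s : List Char) :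
    convLoop (d : Int) s 0 = (spacedA d ++ s, dnA d) := by
  induction d using Nat.strong_induction_on generalizing s with
  | _ d ih =>
  have hm : PySem.Int.mod (d : Int) 16 = ((d % 16 : Nat) : Int) := by
    exact_mod_cast PySem.Int.mod_natCast d 16
  have hf : PySem.Int.floordiv (d : Int) 16 = ((d / 16 : Nat) : Int) := by
    exact_mod_cast PySem.Int.floordiv_natCast d 16
  rw [convLoop, dif_pos (by exact_mod_cast Nat.pos_of_ne_zero (by omega) : (d : Int) > 0)]
  simp only [hm, hf, hexDigitsA_lookup (d % 16) (by omega)]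
  rw [if_neg (by omega)]
  by_cases h16 : d < 16
  · have h0 : ((d / 16 : Nat) : Int) = 0 := by
      have : d / 16 = 0 := by omega
      simp [this]
    rw [h0, convLoop_zero]
    rw [spacedA, dif_pos h16, dnA, dif_pos h16]
    have : d % 16 = d := by omega
    simp [this]
  · -- second iteration
    have hm2 : PySem.Int.mod ((d / 16 : Nat) : Int) 16 = ((d / 16 % 16 : Nat) : Int) := by
      exact_mod_cast PySem.Int.mod_natCast (d / 16) 16
    have hf2 : PySem.Int.floordiv ((d / 16 : Nat) : Int) 16 = ((d / 256 : Nat) : Int) := by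
      have := PySem.Int.floordiv_natCast (d / 16) 16
      rw [show d / 16 / 16 = d / 256 from by omega] at this
      exact_mod_cast this
    rw [convLoop, dif_pos (by exact_mod_cast Nat.pos_of_ne_zero (by omega) : ((d / 16 : Nat) : Int) > 0)]
    simp only [hm2, hf2, hexDigitsA_lookup (d / 16 % 16) (by omega)]
    by_cases h256 : d < 256
    · rw [if_neg (by simp; omega)]
      have h0 : ((d / 256 : Nat) : Int) = 0 := by
        have : d / 256 = 0 := by omega
        simp [this]
      rw [h0, convLoop_zero]
      rw [spacedA, dif_neg h16, dif_pos h256, dnA, dif_neg h16, dif_pos h256]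
      have : d / 16 % 16 = d / 16 := by omega
      simp [this]
    · rw [if_pos (by refine ⟨rfl, ?_⟩; simp only [ne_eq, Nat.cast_eq_zero]; omega)]
      rw [ih (d / 256) (by omega) (by omega)]
      have hsp : spacedA d = spacedA (d / 256) ++ ' ' :: [hexChar (d % 256 / 16), hexChar (d % 16)] := by
        rw [spacedA, dif_neg h16, dif_neg h256]
      have hdn : dnA d = dnA (d / 256) := by
        rw [dnA, dif_neg h16, dif_neg h256]
      rw [hsp, hdn]
      have : d % 256 / 16 = d / 16 % 16 := by omega
      simp [this]

theorem joinSpace_append (L : List (List Char)) (hL : L ≠ []) (b : List Char) :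
    PySem.Chars.join [' '] (L ++ [b]) = PySem.Chars.join [' '] L ++ ' ' :: b := by
  induction L with
  | nil => simp at hL
  | cons x t ih =>
    cases t with
    | nil =>
      rw [List.singleton_append, PySem.Chars.join_cons_cons,
        PySem.Chars.join_singleton, PySem.Chars.join_singleton]
      simp
    | cons y u =>
      simp only [List.cons_append]
      rw [PySem.Chars.join_cons_cons]
      rw [show y :: (u ++ [b]) = (y :: u) ++ [b] from rfl, ih (by simp), PySem.Chars.join_cons_cons]
      simp

theorem padA_eq (d : Nat) (hd : 1 ≤ d) :
    (if dnA d = 1 then '0' :: spacedA d else spacedA d) = PySem.Chars.join [' '] (bytesBE d) := by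
  induction d using Nat.strong_induction_on with
  | _ d ih =>
  by_cases h16 : d < 16
  · rw [dnA, dif_pos h16, spacedA, dif_pos h16, bytesBE, dif_pos (by omega), if_pos rfl,
      PySem.Chars.join_singleton]
    have h1 : d / 16 = 0 := by omega
    have h2 : d % 16 = d := by omega
    simp [h1, h2, hexChar]
  · by_cases h256 : d < 256
    · rw [dnA, dif_neg h16, dif_pos h256, spacedA, dif_neg h16, dif_pos h256, bytesBE,
        dif_pos h256, if_neg (by norm_num), PySem.Chars.join_singleton]
    · rw [dnA, dif_neg h16, dif_neg h256, spacedA, dif_neg h16, dif_neg h256, bytesBE,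
        dif_neg h256, joinSpace_append _ (bytesBE_ne_nil _)]
      rw [← ih (d / 256) (by omega) (by omega)]
      by_cases h1 : dnA (d / 256) = 1
      · rw [if_pos h1, if_pos h1]; simp
      · rw [if_neg h1, if_neg h1]

-- B-side characterisation ---------------------------------------------------

theorem chunk2_append_even (E : List Char) (a b : Char) (h : E.length % 2 = 0) :
    chunk2 (E ++ [a, b]) = chunk2 E ++ [[a, b]] := by
  induction E using chunk2.induct with
  | case1 => rfl
  | case2 x => simp at h
  | case3 x y t ih => simp only [List.cons_append, chunk2]; rw [ih (by simp at h; omega)]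

theorem chunkPad (d : Nat) (hd : 1 ≤ d) :
    chunk2 (if (toHexChars d).length % 2 = 1 then '0' :: toHexChars d else toHexChars d)
      = bytesBE d := by
  induction d using Nat.strong_induction_on with
  | _ d ih =>
  by_cases h16 : d < 16
  · rw [toHexChars, dif_pos h16, bytesBE, dif_pos (by omega)]
    have h1 : d / 16 = 0 := by omega
    have h2 : d % 16 = d := by omega
    simp [h1, h2, chunk2, hexChar]
  · by_cases h256 : d < 256
    · rw [toHexChars, dif_neg h16, toHexChars, dif_pos (by omega : d / 16 < 16)]
      rw [show bytesBE d = [[hexChar (d / 16), hexChar (d % 16)]] from by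
        rw [bytesBE, dif_pos h256]]
      simp [chunk2]
    · -- d ≥ 256 : toHexChars d = toHexChars (d/256) ++ [hexChar (d/16%16), hexChar (d%16)]
      have hsplit : toHexChars d = toHexChars (d / 256) ++ [hexChar (d / 16 % 16), hexChar (d % 16)] := by
        rw [toHexChars, dif_neg h16, toHexChars, dif_neg (by omega : ¬ d / 16 < 16)]
        have : d / 16 / 16 = d / 256 := by omega
        simp [this]
      rw [hsplit]
      have hpar : (toHexChars (d / 256) ++ [hexChar (d / 16 % 16), hexChar (d % 16)]).length % 2
          = (toHexChars (d / 256)).length % 2 := by simp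
      rw [bytesBE, dif_neg (by omega : ¬ d < 256)]
      have hd' : 1 ≤ d / 256 := by omega
      have ihd := ih (d / 256) (by omega) hd'
      have hmod : d % 256 / 16 = d / 16 % 16 := by omega
      by_cases hodd : (toHexChars (d / 256)).length % 2 = 1
      · rw [if_pos (by rw [hpar]; exact hodd)]
        have : ('0' :: (toHexChars (d / 256) ++ [hexChar (d / 16 % 16), hexChar (d % 16)]))
            = ('0' :: toHexChars (d / 256)) ++ [hexChar (d / 16 % 16), hexChar (d % 16)] := by simp
        rw [this, chunk2_append_even _ _ _ (by simp [Nat.succ_mod_two_eq_zero_iff, hodd])]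
        rw [if_pos hodd] at ihd
        rw [ihd, hmod]
      · rw [if_neg (by rw [hpar]; exact hodd)]
        rw [chunk2_append_even _ _ _ (by omega)]
        rw [if_neg hodd] at ihd
        rw [ihd, hmod]

-- join/indexing facts --------------------------------------------------------

theorem join_length (L : List (List Char)) (hL : L ≠ []) (h2 : ∀ b ∈ L, b.length = 2) :
    (PySem.Chars.join [' '] L).length = 3 * L.length - 1 := by
  induction L with
  | nil => simp at hL
  | cons b t ih =>
    cases t with
    | nil => rw [PySem.Chars.join_singleton]; simp [h2 b (by simp)]
    | cons y u =>
      rw [PySem.Chars.join_cons_cons]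
      have := ih (by simp) (fun x hx => h2 x (by simp [hx]))
      simp only [List.length_append, this, List.length_cons, h2 b (by simp)]
      simp; omega

theorem join_getElem (L : List (List Char)) (h2 : ∀ b ∈ L, b.length = 2)
    (a r : Nat) (ha : a < L.length) (hr : r < 3) (hb : 3 * a + r < 3 * L.length - 1) :
    (PySem.Chars.join [' '] L)[3 * a + r]? =
      if r = 2 then some ' ' else (L[a]?).bind (fun b => b[r]?) := by
  induction L generalizing a with
  | nil => simp at ha
  | cons b t ih =>
    have hblen : b.length = 2 := h2 b (by simp)
    cases a with
    | zero =>
      cases t with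
      | nil =>
        simp only [List.length_cons, List.length_nil] at hb
        have hr2 : r < 2 := by omega
        rw [PySem.Chars.join_singleton, if_neg (by omega)]
        simp
      | cons y u =>
        rw [PySem.Chars.join_cons_cons]
        by_cases hr2 : r = 2
        · subst hr2
          rw [if_pos rfl, show 3 * 0 + 2 = 2 from rfl,
            List.getElem?_append_left (by simp [hblen]),
            List.getElem?_append_right (by omega)]
          simp [hblen]
        · rw [if_neg hr2]
          rw [show 3 * 0 + r = r from by omega, List.getElem?_append_left (by simp; omega)]
          rw [List.getElem?_append_left (by omega)]
          simp
    | succ a =>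
      cases t with
      | nil => simp at ha
      | cons y u =>
        rw [PySem.Chars.join_cons_cons]
        rw [List.getElem?_append_right (by simp [hblen]; omega)]
        rw [show 3 * (a + 1) + r - (b ++ [' ']).length = 3 * a + r from by simp [hblen]; omega]
        rw [ih (fun x hx => h2 x (by simp [hx])) a (by simpa using ha) (by simp at hb ⊢; omega)]
        simp

-- the two-pointer loop turns s into t ---------------------------------------

theorem revLoop_inv (s t : List Char) (len : Nat) (hs : s.length = len) (ht : t.length = len)
    (hmod : len % 3 = 2)
    (hsp : ∀ p : Nat, p < len → p % 3 = 2 → t[p]? = s[p]?)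
    (hsw : ∀ p : Nat, p < len → p % 3 ≠ 2 → t[p]? = s[len - 2 - (p - p % 3) + p % 3]?)
    (a : Nat) (new : List Char) (hnew : new.length = len)
    (hout : ∀ p : Nat, p < len → (p < 3 * a ∨ len - 3 * a ≤ p) → new[p]? = t[p]?)
    (hin : ∀ p : Nat, p < len → 3 * a ≤ p → p < len - 3 * a → new[p]? = s[p]?) :
    revLoop s new (3 * (a : Int)) (3 * (a : Int) + 1) ((len : Int) - 2 - 3 * (a : Int))
      ((len : Int) - 1 - 3 * (a : Int)) = t := by
  by_cases hc : (3 * (a : Int)) ≤ (len : Int) - 2 - 3 * (a : Int)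
  case neg =>
    rw [revLoop, dif_neg hc]
    apply List.ext_getElem?
    intro p
    by_cases hp : p < len
    · exact hout p hp (by omega)
    · rw [List.getElem?_eq_none (by omega), List.getElem?_eq_none (by omega)]
  case pos =>
    have hval : ∀ q : Nat, q < len → some (s.getD q ' ') = s[q]? := by
      intro q hq
      rw [List.getD_eq_getElem?_getD, List.getElem?_eq_getElem (by omega)]
      rfl
    rw [revLoop, dif_pos hc]
    have hsetI : ∀ (xs : List Char) (v : Char), PySem.List.pySetD xs (3 * (a : Int)) v = xs.set (3 * a) v := by
      intro xs v
      rw [show (3 * (a : Int)) = (((3 * a : Nat)) : Int) from by push_cast; ring, PySem.List.pySetD_natCast]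
    have hsetJ : ∀ (xs : List Char) (v : Char), PySem.List.pySetD xs (3 * (a : Int) + 1) v = xs.set (3 * a + 1) v := by
      intro xs v
      rw [show (3 * (a : Int) + 1) = (((3 * a + 1 : Nat)) : Int) from by push_cast; ring, PySem.List.pySetD_natCast]
    have hsetM : ∀ (xs : List Char) (v : Char), PySem.List.pySetD xs ((len : Int) - 2 - 3 * (a : Int)) v = xs.set (len - 2 - 3 * a) v := by
      intro xs v
      rw [show ((len : Int) - 2 - 3 * (a : Int)) = (((len - 2 - 3 * a : Nat)) : Int) from by omega, PySem.List.pySetD_natCast]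
    have hsetN : ∀ (xs : List Char) (v : Char), PySem.List.pySetD xs ((len : Int) - 1 - 3 * (a : Int)) v = xs.set (len - 1 - 3 * a) v := by
      intro xs v
      rw [show ((len : Int) - 1 - 3 * (a : Int)) = (((len - 1 - 3 * a : Nat)) : Int) from by omega, PySem.List.pySetD_natCast]
    have hgetI : ∀ (xs : List Char) (d : Char), PySem.List.pyGetD xs (3 * (a : Int)) d = xs.getD (3 * a) d := by
      intro xs d
      rw [show (3 * (a : Int)) = (((3 * a : Nat)) : Int) from by push_cast; ring, PySem.List.pyGetD_natCast]
    have hgetJ : ∀ (xs : List Char) (d : Char), PySem.List.pyGetD xs (3 * (a : Int) + 1) d = xs.getD (3 * a + 1) d := by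
      intro xs d
      rw [show (3 * (a : Int) + 1) = (((3 * a + 1 : Nat)) : Int) from by push_cast; ring, PySem.List.pyGetD_natCast]
    have hgetM : ∀ (xs : List Char) (d : Char), PySem.List.pyGetD xs ((len : Int) - 2 - 3 * (a : Int)) d = xs.getD (len - 2 - 3 * a) d := by
      intro xs d
      rw [show ((len : Int) - 2 - 3 * (a : Int)) = (((len - 2 - 3 * a : Nat)) : Int) from by omega, PySem.List.pyGetD_natCast]
    have hgetN : ∀ (xs : List Char) (d : Char), PySem.List.pyGetD xs ((len : Int) - 1 - 3 * (a : Int)) d = xs.getD (len - 1 - 3 * a) d := by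
      intro xs d
      rw [show ((len : Int) - 1 - 3 * (a : Int)) = (((len - 1 - 3 * a : Nat)) : Int) from by omega, PySem.List.pyGetD_natCast]
    simp only [hsetI, hsetJ, hsetM, hsetN, hgetI, hgetJ, hgetM, hgetN]
    rw [show 3 * (a : Int) + 3 = 3 * ((a + 1 : Nat) : Int) from by push_cast; ring,
        show 3 * (a : Int) + 1 + 3 = 3 * ((a + 1 : Nat) : Int) + 1 from by push_cast; ring,
        show (len : Int) - 2 - 3 * (a : Int) - 3 = (len : Int) - 2 - 3 * ((a + 1 : Nat) : Int) from by omega,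
        show (len : Int) - 1 - 3 * (a : Int) - 3 = (len : Int) - 1 - 3 * ((a + 1 : Nat) : Int) from by omega]
    refine revLoop_inv s t len hs ht hmod hsp hsw (a + 1) _ ?_ ?_ ?_
    · simp [hnew]
    · intro p hp hcond
      simp only [List.getElem?_set, List.length_set, hnew]
      by_cases h4 : len - 1 - 3 * a = p
      · rw [if_pos h4, if_pos (by omega), hval (3 * a + 1) (by omega), hsw p hp (by omega),
          show len - 2 - (p - p % 3) + p % 3 = 3 * a + 1 from by omega]
      · rw [if_neg h4]
        by_cases h3 : len - 2 - 3 * a = p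
        · rw [if_pos h3, if_pos (by omega), hval (3 * a) (by omega), hsw p hp (by omega),
            show len - 2 - (p - p % 3) + p % 3 = 3 * a from by omega]
        · rw [if_neg h3]
          by_cases h2 : 3 * a + 1 = p
          · rw [if_pos h2, if_pos (by omega), hval (len - 1 - 3 * a) (by omega), hsw p hp (by omega),
              show len - 2 - (p - p % 3) + p % 3 = len - 1 - 3 * a from by omega]
          · rw [if_neg h2]
            by_cases h1 : 3 * a = p
            · rw [if_pos h1, if_pos (by omega), hval (len - 2 - 3 * a) (by omega), hsw p hp (by omega),
                show len - 2 - (p - p % 3) + p % 3 = len - 2 - 3 * a from by omega]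
            · rw [if_neg h1]
              by_cases hpo : p < 3 * a ∨ len - 3 * a ≤ p
              · exact hout p hp hpo
              · rw [hin p hp (by omega) (by omega), hsp p hp (by omega)]
    · intro p hp hlo hhi
      rw [List.getElem?_set, List.getElem?_set, List.getElem?_set, List.getElem?_set,
        if_neg (by omega), if_neg (by omega), if_neg (by omega), if_neg (by omega)]
      exact hin p hp (by omega) (by omega)
termination_by len - 6 * a
decreasing_by omega

theorem revEnd_join (L : List (List Char)) (hL : L ≠ []) (h2 : ∀ b ∈ L, b.length = 2) :
    reverse_endianness (PySem.Chars.join [' '] L) = PySem.Chars.join [' '] L.reverse := by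
  have hLpos : 1 ≤ L.length := List.length_pos_iff.mpr hL
  set len := 3 * L.length - 1 with hlen
  have hs : (PySem.Chars.join [' '] L).length = len := join_length L hL h2
  have h2r : ∀ b ∈ L.reverse, b.length = 2 := fun b hb => h2 b (List.mem_reverse.mp hb)
  have ht : (PySem.Chars.join [' '] L.reverse).length = len := by
    rw [join_length L.reverse (by simpa using hL) h2r, List.length_reverse]
  have hmod : len % 3 = 2 := by omega
  have hsp : ∀ p : Nat, p < len → p % 3 = 2 →
      (PySem.Chars.join [' '] L.reverse)[p]? = (PySem.Chars.join [' '] L)[p]? := by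
    intro p hp hp3
    have h1 := join_getElem L.reverse h2r (p / 3) (p % 3) (by simp; omega) (by omega)
      (by simp [List.length_reverse]; omega)
    have h3 := join_getElem L h2 (p / 3) (p % 3) (by omega) (by omega) (by omega)
    rw [show 3 * (p / 3) + p % 3 = p from by omega] at h1 h3
    rw [h1, h3, if_pos hp3, if_pos hp3]
  have hsw : ∀ p : Nat, p < len → p % 3 ≠ 2 →
      (PySem.Chars.join [' '] L.reverse)[p]? =
        (PySem.Chars.join [' '] L)[len - 2 - (p - p % 3) + p % 3]? := by
    intro p hp hp3
    have hap : p / 3 < L.length := by omega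
    have h1 := join_getElem L.reverse h2r (p / 3) (p % 3) (by simp; omega) (by omega)
      (by simp [List.length_reverse]; omega)
    rw [show 3 * (p / 3) + p % 3 = p from by omega] at h1
    have h3 := join_getElem L h2 (L.length - 1 - p / 3) (p % 3) (by omega) (by omega) (by omega)
    rw [show 3 * (L.length - 1 - p / 3) + p % 3 = len - 2 - (p - p % 3) + p % 3 from by omega] at h3
    rw [h1, h3, if_neg hp3, if_neg hp3, List.getElem?_reverse (by omega)]
  have H := revLoop_inv (PySem.Chars.join [' '] L) (PySem.Chars.join [' '] L.reverse) len hs ht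
    hmod hsp hsw 0 (PySem.Chars.join [' '] L) hs
    (by intro p hp hc; omega)
    (fun p hp _ _ => rfl)
  unfold reverse_endianness
  rw [hs]
  simpa using H

-- ===== VERDICT (by name: the statement is the Claim_ definition above) =====
theorem conv_endian_spec : Claim_equal_conv_endian := by
  intro num endian _dom
  simp only [Spec_conv_endian, conv_endian, conv_endian_alt]
  by_cases hval : endian ≠ "big" ∧ endian ≠ "little"
  · rw [if_pos hval, if_pos hval]
  · rw [if_neg hval, if_neg hval]
    by_cases h0 : num = 0
    · subst h0
      rw [if_pos rfl]
      simp only [Int.natAbs_zero]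
      rw [show toHexChars 0 = ['0'] from by rw [toHexChars]; norm_num; rfl]
      by_cases hl : endian = "little" <;>
        · simp only [hl, chunk2, PySem.Chars.join_singleton, if_true, if_false, List.length_cons,
            List.length_nil, List.reverse_singleton]
          decide
    · rw [if_neg h0]
      have hd : 1 ≤ num.natAbs := by omega
      rw [show |num| = ((num.natAbs : Nat) : Int) from Int.abs_eq_natAbs num]
      rw [convLoop_spec num.natAbs hd []]
      simp only [List.append_nil]
      have hA := padA_eq num.natAbs hd
      have hB := chunkPad num.natAbs hd
      rw [hB, hA]
      by_cases hl : endian = "little"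
      · rw [if_pos hl, if_pos hl,
          revEnd_join (bytesBE num.natAbs) (bytesBE_ne_nil _) (bytesBE_blocks _)]
      · rw [if_neg hl, if_neg hl]
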